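-- pv_equiv track=rewrite | github.com/myungwooko/algorithm | _interviewing.io/200203_availableTime.py | availableTime
-- ===== SOURCE A (Python) =====
-- def availableTime(times):
--     candidates = []
--     for time in times:
--         candidates += time
--
--     times = sorted(candidates, key=lambda x: x[0])
--
--     idx = 0
--     res = []
--     while idx < len(times) - 1:
--         if times[idx][1] > times[idx + 1][0] or times[idx][1] > times[idx + 1][1]:
--             times[idx] = (min(times[idx][0], times[idx + 1][0]), max(times[idx][1], times[idx + 1][1]))
--             times.pop(idx + 1)
--             continue
--         else:
--             if times[idx][1] != times[idx + 1][0]: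
--                 res.append((times[idx][1], times[idx + 1][0]))
--         idx += 1
--     return res
-- ===== SOURCE B (Python) =====
-- def availableTime(times):
--     intervals = sorted((iv for t in times for iv in t), key=lambda x: x[0])
--     res = []
--     if not intervals:
--         return res
--     lo, hi = intervals[0]
--     for s, e in intervals[1:]:
--         if hi > s or hi > e:
--             lo, hi = min(lo, s), max(hi, e)
--         else:
--             if hi != s:
--                 res.append((hi, s))
--             lo, hi = s, e
--     return res
-- ===== Notes on version B (the rewrite author's own statement) =====
-- stated objective: faster
-- what changed: Replaced A's in-place merge loop that repeatedly mutates and pops from the sorted list (O(n) per pop) with a single linear sweep over the sorted intervals that keeps only the current merged interval (lo, hi) and emits gaps as it goes.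
import Mathlib
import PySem

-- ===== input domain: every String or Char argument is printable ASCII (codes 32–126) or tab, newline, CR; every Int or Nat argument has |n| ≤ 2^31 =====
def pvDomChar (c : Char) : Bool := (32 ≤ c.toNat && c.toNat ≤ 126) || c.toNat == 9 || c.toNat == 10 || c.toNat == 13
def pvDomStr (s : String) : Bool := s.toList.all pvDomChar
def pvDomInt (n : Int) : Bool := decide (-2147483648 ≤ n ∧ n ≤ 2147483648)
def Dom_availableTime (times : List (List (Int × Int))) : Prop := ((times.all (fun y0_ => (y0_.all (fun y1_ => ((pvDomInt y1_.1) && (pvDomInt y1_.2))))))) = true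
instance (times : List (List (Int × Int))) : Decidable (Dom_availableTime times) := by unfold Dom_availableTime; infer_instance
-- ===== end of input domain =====

-- B replaces A's quadratic in-place merge-and-pop loop with one linear sweep carrying the current merged interval (objective: faster).

-- ===== PORT A =====
-- the while loop: state is the mutable list `ts`, the index `idx` and the output `res`
def availTimeLoopA (ts : List (Int × Int)) (idx : Nat) (res : List (Int × Int)) : List (Int × Int) :=
  if h : idx + 1 < ts.length then
    let a := ts[idx]
    let b := ts[idx + 1]
    if a.2 > b.1 ∨ a.2 > b.2 then
      availTimeLoopA ((ts.set idx (min a.1 b.1, max a.2 b.2)).eraseIdx (idx + 1)) idx res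
    else
      availTimeLoopA ts (idx + 1) (if a.2 ≠ b.1 then res ++ [(a.2, b.1)] else res)
  else res
termination_by ts.length - idx
decreasing_by
  · simp [List.length_eraseIdx, List.length_set, h]; omega
  · omega

def availableTime (times : List (List (Int × Int))) : List (Int × Int) :=
  let candidates := times.foldl (fun acc t => acc ++ t) []
  let ts := PySem.List.sorted candidates (fun x => x.1)
  availTimeLoopA ts 0 []

-- ===== PORT B =====
-- the for loop: carries only the current merged interval (lo, hi)
def availTimeLoopB (cur : Int × Int) : List (Int × Int) → List (Int × Int)
  | [] => []
  | (s, e) :: rest =>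
    if cur.2 > s ∨ cur.2 > e then availTimeLoopB (min cur.1 s, max cur.2 e) rest
    else if cur.2 ≠ s then (cur.2, s) :: availTimeLoopB (s, e) rest
    else availTimeLoopB (s, e) rest

def availableTime_alt (times : List (List (Int × Int))) : List (Int × Int) :=
  let intervals := PySem.List.sorted (times.flatMap id) (fun x => x.1)
  match intervals with
  | [] => []
  | c :: rest => availTimeLoopB c rest

-- ===== PRECONDITION & SPEC =====
def Spec_availableTime (times : List (List (Int × Int))) (out : List (Int × Int)) : Prop := out = availableTime_alt times
instance (times : List (List (Int × Int))) (out : List (Int × Int)) : Decidable (Spec_availableTime times out) := by unfold Spec_availableTime; infer_instance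

-- ===== CLAIM (what is proved, stated in full; the proofs are below) =====
def Claim_equal_availableTime : Prop := ∀ (times : List (List (Int × Int))), Dom_availableTime times → Spec_availableTime times (availableTime times)

-- ===== LEMMAS AND PROOFS =====

-- A's loop at position `pre.length` of `pre ++ cur :: rest` never looks at `pre` again:
-- it computes exactly B's sweep over `cur :: rest`, appended to `res`.
theorem availTimeLoopA_eq (rest : List (Int × Int)) :
    ∀ (pre : List (Int × Int)) (cur : Int × Int) (res : List (Int × Int)),
      availTimeLoopA (pre ++ cur :: rest) pre.length res = res ++ availTimeLoopB cur rest := by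
  induction rest with
  | nil =>
    intro pre cur res
    rw [availTimeLoopA]
    simp [availTimeLoopB]
  | cons b rest ih =>
    intro pre cur res
    obtain ⟨s, e⟩ := b
    rw [availTimeLoopA]
    have hlen : pre.length + 1 < (pre ++ cur :: (s, e) :: rest).length := by
      simp
    have h1 : (pre ++ cur :: (s, e) :: rest)[pre.length]'(by simp) = cur := by
      simp
    have h2 : (pre ++ cur :: (s, e) :: rest)[pre.length + 1]'(by simp) = (s, e) := by
      rw [List.getElem_append_right (by omega)]
      simp
    simp only [hlen, dif_pos, h1, h2]
    by_cases hm : cur.2 > s ∨ cur.2 > e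
    · rw [if_pos hm]
      have hset : ((pre ++ cur :: (s, e) :: rest).set pre.length
            (min cur.1 s, max cur.2 e)).eraseIdx (pre.length + 1)
          = pre ++ (min cur.1 s, max cur.2 e) :: rest := by
        rw [List.set_append_right _ _ (le_refl _)]
        simp only [Nat.sub_self, List.set_cons_zero]
        rw [List.eraseIdx_append_of_length_le (by simp)]
        simp
      rw [hset, ih pre (min cur.1 s, max cur.2 e) res]
      simp [availTimeLoopB, hm]
    · rw [if_neg hm]
      have hshift : pre ++ cur :: (s, e) :: rest = (pre ++ [cur]) ++ (s, e) :: rest := by simp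
      have hlen2 : pre.length + 1 = (pre ++ [cur]).length := by simp
      rw [hshift, hlen2, ih (pre ++ [cur]) (s, e)]
      by_cases hne : cur.2 ≠ s
      · simp [availTimeLoopB, hm, hne]
      · simp [availTimeLoopB, hm, hne]

-- ===== VERDICT (by name: the statement is the Claim_ definition above) =====
theorem availableTime_spec : Claim_equal_availableTime := by
  intro times _
  unfold Spec_availableTime
  have hA : availableTime times
      = availTimeLoopA (PySem.List.sorted times.flatten (fun x => x.1)) 0 [] := by
    unfold availableTime
    rw [PySem.List.foldl_append_eq_flatten, List.nil_append]
  have hB : availableTime_alt times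
      = (match PySem.List.sorted times.flatten (fun x => x.1) with
         | [] => ([] : List (Int × Int))
         | c :: rest => availTimeLoopB c rest) := by
    unfold availableTime_alt
    rw [show times.flatMap id = times.flatten from by simp]
  rw [hA, hB]
  cases PySem.List.sorted times.flatten (fun x => x.1) with
  | nil => rw [availTimeLoopA]; simp
  | cons c rest => simpa using availTimeLoopA_eq rest [] c []
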